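-- pv_equiv track=rewrite | github.com/itzcole03/A1Betting7-13.2 | backend/simple_server.py | get_in_season_sports
-- ===== SOURCE A (Python) =====
-- def get_in_season_sports(month: int) -> list[str]:
--     """
--     Determine which sports are in season for the given month.
--     Returns a list of sports that are currently active.
--     """
--     # Define sport seasons (months when each sport is active)
--     sport_seasons = {
--         "MLB": [4, 5, 6, 7, 8, 9, 10],  # April-October
--         "NFL": [9, 10, 11, 12, 1, 2],  # September-February
--         "NBA": [10, 11, 12, 1, 2, 3, 4, 5, 6],  # October-June
--         "NHL": [10, 11, 12, 1, 2, 3, 4, 5, 6],  # October-June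
--         "WNBA": [5, 6, 7, 8, 9, 10],  # May-October
--         "MLS": [2, 3, 4, 5, 6, 7, 8, 9, 10, 11],  # February-November
--         "SOCCER": [2, 3, 4, 5, 6, 7, 8, 9, 10, 11],  # February-November
--         "PGA": [1, 2, 3, 4, 5, 6, 7, 8, 9, 10, 11, 12],  # Year-round
--         "TENNIS": [1, 2, 3, 4, 5, 6, 7, 8, 9, 10, 11, 12],  # Year-round
--         "MMA": [1, 2, 3, 4, 5, 6, 7, 8, 9, 10, 11, 12],  # Year-round
--         "UFC": [1, 2, 3, 4, 5, 6, 7, 8, 9, 10, 11, 12],  # Year-round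
--         "BOXING": [1, 2, 3, 4, 5, 6, 7, 8, 9, 10, 11, 12],  # Year-round
--         "NASCAR": [2, 3, 4, 5, 6, 7, 8, 9, 10, 11],  # February-November
--         "KBO": [3, 4, 5, 6, 7, 8, 9, 10],  # March-October
--         "CS2": [1, 2, 3, 4, 5, 6, 7, 8, 9, 10, 11, 12],  # Year-round
--         "NCAAF": [8, 9, 10, 11, 12, 1],  # August-January
--         "NCAAB": [11, 12, 1, 2, 3, 4],  # November-April
--     }
--
--     in_season_sports = []
--     for sport, months in sport_seasons.items():
--         if month in months:
--             in_season_sports.append(sport)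
--
--     return in_season_sports
-- ===== SOURCE B (Python) =====
-- def get_in_season_sports(month: int) -> list[str]:
--     """
--     Determine which sports are in season for the given month.
--     Returns a list of sports that are currently active.
--     """
--     # Precomputed inverted table: month -> sports in season that month.
--     month_table = {
--         1: ['NFL', 'NBA', 'NHL', 'PGA', 'TENNIS', 'MMA', 'UFC', 'BOXING', 'CS2', 'NCAAF', 'NCAAB'],
--         2: ['NFL', 'NBA', 'NHL', 'MLS', 'SOCCER', 'PGA', 'TENNIS', 'MMA', 'UFC', 'BOXING', 'NASCAR', 'CS2', 'NCAAB'],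
--         3: ['NBA', 'NHL', 'MLS', 'SOCCER', 'PGA', 'TENNIS', 'MMA', 'UFC', 'BOXING', 'NASCAR', 'KBO', 'CS2', 'NCAAB'],
--         4: ['MLB', 'NBA', 'NHL', 'MLS', 'SOCCER', 'PGA', 'TENNIS', 'MMA', 'UFC', 'BOXING', 'NASCAR', 'KBO', 'CS2', 'NCAAB'],
--         5: ['MLB', 'NBA', 'NHL', 'WNBA', 'MLS', 'SOCCER', 'PGA', 'TENNIS', 'MMA', 'UFC', 'BOXING', 'NASCAR', 'KBO', 'CS2'],
--         6: ['MLB', 'NBA', 'NHL', 'WNBA', 'MLS', 'SOCCER', 'PGA', 'TENNIS', 'MMA', 'UFC', 'BOXING', 'NASCAR', 'KBO', 'CS2'],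
--         7: ['MLB', 'WNBA', 'MLS', 'SOCCER', 'PGA', 'TENNIS', 'MMA', 'UFC', 'BOXING', 'NASCAR', 'KBO', 'CS2'],
--         8: ['MLB', 'WNBA', 'MLS', 'SOCCER', 'PGA', 'TENNIS', 'MMA', 'UFC', 'BOXING', 'NASCAR', 'KBO', 'CS2', 'NCAAF'],
--         9: ['MLB', 'NFL', 'WNBA', 'MLS', 'SOCCER', 'PGA', 'TENNIS', 'MMA', 'UFC', 'BOXING', 'NASCAR', 'KBO', 'CS2', 'NCAAF'],
--         10: ['MLB', 'NFL', 'NBA', 'NHL', 'WNBA', 'MLS', 'SOCCER', 'PGA', 'TENNIS', 'MMA', 'UFC', 'BOXING', 'NASCAR', 'KBO', 'CS2', 'NCAAF'],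
--         11: ['NFL', 'NBA', 'NHL', 'MLS', 'SOCCER', 'PGA', 'TENNIS', 'MMA', 'UFC', 'BOXING', 'NASCAR', 'CS2', 'NCAAF', 'NCAAB'],
--         12: ['NFL', 'NBA', 'NHL', 'PGA', 'TENNIS', 'MMA', 'UFC', 'BOXING', 'CS2', 'NCAAF', 'NCAAB'],
--     }
--     return month_table.get(month, [])
-- ===== Notes on version B (the rewrite author's own statement) =====
-- stated objective: idiomatic
-- what changed: Replaced the sport->months dict plus a per-sport membership scan with a precomputed inverted month->sports table and a single dict lookup with default [].
import Mathlib
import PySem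

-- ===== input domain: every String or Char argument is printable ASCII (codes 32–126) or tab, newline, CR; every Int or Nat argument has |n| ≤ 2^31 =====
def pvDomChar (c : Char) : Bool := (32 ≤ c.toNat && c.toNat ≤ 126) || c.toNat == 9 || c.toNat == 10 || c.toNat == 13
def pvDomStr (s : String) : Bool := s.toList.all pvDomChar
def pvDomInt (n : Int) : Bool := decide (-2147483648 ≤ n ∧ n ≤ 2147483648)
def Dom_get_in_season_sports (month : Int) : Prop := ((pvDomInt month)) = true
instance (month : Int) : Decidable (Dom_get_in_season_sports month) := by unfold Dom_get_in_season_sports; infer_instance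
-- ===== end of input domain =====

-- B replaces the sport→months dict plus a scan with a precomputed month→sports inverted table
-- and a single lookup (objective: idiomatic data-structure change; same constant cost).

-- ===== PORT A =====
-- the sport_seasons dict of A, iterated in insertion order
def pvSportSeasons : List (String × List Int) :=
  [ ("MLB", [4, 5, 6, 7, 8, 9, 10]),
    ("NFL", [9, 10, 11, 12, 1, 2]),
    ("NBA", [10, 11, 12, 1, 2, 3, 4, 5, 6]),
    ("NHL", [10, 11, 12, 1, 2, 3, 4, 5, 6]),
    ("WNBA", [5, 6, 7, 8, 9, 10]),
    ("MLS", [2, 3, 4, 5, 6, 7, 8, 9, 10, 11]),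
    ("SOCCER", [2, 3, 4, 5, 6, 7, 8, 9, 10, 11]),
    ("PGA", [1, 2, 3, 4, 5, 6, 7, 8, 9, 10, 11, 12]),
    ("TENNIS", [1, 2, 3, 4, 5, 6, 7, 8, 9, 10, 11, 12]),
    ("MMA", [1, 2, 3, 4, 5, 6, 7, 8, 9, 10, 11, 12]),
    ("UFC", [1, 2, 3, 4, 5, 6, 7, 8, 9, 10, 11, 12]),
    ("BOXING", [1, 2, 3, 4, 5, 6, 7, 8, 9, 10, 11, 12]),
    ("NASCAR", [2, 3, 4, 5, 6, 7, 8, 9, 10, 11]),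
    ("KBO", [3, 4, 5, 6, 7, 8, 9, 10]),
    ("CS2", [1, 2, 3, 4, 5, 6, 7, 8, 9, 10, 11, 12]),
    ("NCAAF", [8, 9, 10, 11, 12, 1]),
    ("NCAAB", [11, 12, 1, 2, 3, 4]) ]

def get_in_season_sports (month : Int) : List String :=
  pvSportSeasons.foldl
    (fun in_season_sports sm =>
      if sm.2.contains month then in_season_sports ++ [sm.1] else in_season_sports)
    []

-- ===== PORT B =====
-- B's precomputed inverted table: month -> sports in season that month
def pvMonthTable : PySem.Dict Int (List String) := PySem.Dict.ofList
  [ (1, ["NFL", "NBA", "NHL", "PGA", "TENNIS", "MMA", "UFC", "BOXING", "CS2", "NCAAF", "NCAAB"]),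
    (2, ["NFL", "NBA", "NHL", "MLS", "SOCCER", "PGA", "TENNIS", "MMA", "UFC", "BOXING", "NASCAR", "CS2", "NCAAB"]),
    (3, ["NBA", "NHL", "MLS", "SOCCER", "PGA", "TENNIS", "MMA", "UFC", "BOXING", "NASCAR", "KBO", "CS2", "NCAAB"]),
    (4, ["MLB", "NBA", "NHL", "MLS", "SOCCER", "PGA", "TENNIS", "MMA", "UFC", "BOXING", "NASCAR", "KBO", "CS2", "NCAAB"]),
    (5, ["MLB", "NBA", "NHL", "WNBA", "MLS", "SOCCER", "PGA", "TENNIS", "MMA", "UFC", "BOXING", "NASCAR", "KBO", "CS2"]),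
    (6, ["MLB", "NBA", "NHL", "WNBA", "MLS", "SOCCER", "PGA", "TENNIS", "MMA", "UFC", "BOXING", "NASCAR", "KBO", "CS2"]),
    (7, ["MLB", "WNBA", "MLS", "SOCCER", "PGA", "TENNIS", "MMA", "UFC", "BOXING", "NASCAR", "KBO", "CS2"]),
    (8, ["MLB", "WNBA", "MLS", "SOCCER", "PGA", "TENNIS", "MMA", "UFC", "BOXING", "NASCAR", "KBO", "CS2", "NCAAF"]),
    (9, ["MLB", "NFL", "WNBA", "MLS", "SOCCER", "PGA", "TENNIS", "MMA", "UFC", "BOXING", "NASCAR", "KBO", "CS2", "NCAAF"]),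
    (10, ["MLB", "NFL", "NBA", "NHL", "WNBA", "MLS", "SOCCER", "PGA", "TENNIS", "MMA", "UFC", "BOXING", "NASCAR", "KBO", "CS2", "NCAAF"]),
    (11, ["NFL", "NBA", "NHL", "MLS", "SOCCER", "PGA", "TENNIS", "MMA", "UFC", "BOXING", "NASCAR", "CS2", "NCAAF", "NCAAB"]),
    (12, ["NFL", "NBA", "NHL", "PGA", "TENNIS", "MMA", "UFC", "BOXING", "CS2", "NCAAF", "NCAAB"]) ]

def get_in_season_sports_alt (month : Int) : List String :=
  PySem.Dict.getD pvMonthTable month []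

-- ===== PRECONDITION & SPEC =====
def Spec_get_in_season_sports (month : Int) (out : List String) : Prop := out = get_in_season_sports_alt month
instance (month : Int) (out : List String) : Decidable (Spec_get_in_season_sports month out) := by unfold Spec_get_in_season_sports; infer_instance

-- ===== CLAIM (what is proved, stated in full; the proofs are below) =====
def Claim_equal_get_in_season_sports : Prop := ∀ (month : Int), Dom_get_in_season_sports month → Spec_get_in_season_sports month (get_in_season_sports month)

-- ===== LEMMAS AND PROOFS =====

-- generic: a fold that appends only when month occurs does nothing if month occurs nowhere
theorem pv_foldl_nil (month : Int) :
    ∀ (l : List (String × List Int)) (acc : List String),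
      (∀ sm ∈ l, sm.2.contains month = false) →
      l.foldl (fun a sm => if sm.2.contains month then a ++ [sm.1] else a) acc = acc := by
  intro l
  induction l with
  | nil => intro acc _; rfl
  | cons hd tl ih =>
    intro acc h
    simp only [List.foldl, h hd (List.mem_cons_self), if_neg, Bool.false_eq_true,
      not_false_iff]
    · exact ih acc (fun sm hm => h sm (List.mem_cons_of_mem _ hm))

theorem pv_get?_nil (month : Int) :
    ∀ (l : List (Int × List String)), (∀ kv ∈ l, kv.1 ≠ month) →
      (PySem.Dict.mk l).get? month = none := by
  intro l
  induction l with
  | nil => intro _; rfl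
  | cons hd tl ih =>
    intro h
    rw [show (PySem.Dict.mk (hd :: tl)) = PySem.Dict.mk ((hd.1, hd.2) :: tl) by rfl]
    rw [PySem.Dict.get?_mk_cons]
    rw [if_neg (by simpa using h hd (List.mem_cons_self))]
    exact ih (fun kv hm => h kv (List.mem_cons_of_mem _ hm))

-- outside 1..12 both programs yield []
theorem pv_out_of_range (month : Int) (h : month < 1 ∨ 12 < month) :
    get_in_season_sports month = [] ∧ get_in_season_sports_alt month = [] := by
  constructor
  · unfold get_in_season_sports
    apply pv_foldl_nil
    intro sm hm
    have hb : ∀ sm ∈ pvSportSeasons, ∀ m ∈ sm.2, (1:Int) ≤ m ∧ m ≤ 12 := by decide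
    by_contra hc
    have hmem : month ∈ sm.2 := by
      simpa [List.contains_iff_mem] using hc
    have := hb sm hm month hmem
    omega
  · unfold get_in_season_sports_alt pvMonthTable PySem.Dict.ofList
    rw [PySem.Dict.getD_eq_get?_getD, pv_get?_nil]
    · rfl
    · intro kv hm
      fin_cases hm <;> simp <;> omega

-- ===== VERDICT (by name: the statement is the Claim_ definition above) =====
theorem get_in_season_sports_spec : Claim_equal_get_in_season_sports := by
  intro month _
  unfold Spec_get_in_season_sports
  by_cases h : 1 ≤ month ∧ month ≤ 12
  · obtain ⟨h1, h2⟩ := h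
    interval_cases month <;> decide
  · have := pv_out_of_range month (by omega)
    rw [this.1, this.2]
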